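-- pv_equiv track=rewrite | github.com/AntonMilienkov/OnnxAnalyzator | analyzator/graph_analysis.py | _estimate_node_depths
-- ===== SOURCE A (Python) =====
-- from collections import Counter, defaultdict, deque
--
-- def _estimate_node_depths(node_count, adjacency, topo_order):
--
--     reverse_adj = defaultdict(list)
--
--     for src, dst_list in adjacency.items():
--         for dst in dst_list:
--             reverse_adj[dst].append(src)
--
--     depth_by_node = {idx: 0 for idx in range(node_count)}
--
--     for node_idx in topo_order:
--         parents = reverse_adj.get(node_idx, [])
--         if not parents:
--             depth_by_node[node_idx] = 0
--         else:
--             depth_by_node[node_idx] = 1 + max(depth_by_node[parent] for parent in parents)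
--
--     return depth_by_node
-- ===== SOURCE B (Python) =====
-- def _estimate_node_depths(node_count, adjacency, topo_order):
--     depth_by_node = {idx: 0 for idx in range(node_count)}
--     for node_idx in topo_order:
--         depth_by_node[node_idx] = max(
--             (depth_by_node[src] + 1
--              for src, dst_list in adjacency.items()
--              for dst in dst_list
--              if dst == node_idx),
--             default=0,
--         )
--     return depth_by_node
-- ===== Notes on version B (the rewrite author's own statement) =====
-- stated objective: simpler
-- what changed: B drops the reverse-adjacency table and the empty/non-empty branch entirely: for each topo node it takes max(depth[src]+1 for each incoming edge found by scanning adjacency directly, default=0), one dict and one expression instead of two dicts and a prebuilt reverse index.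
import Mathlib
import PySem

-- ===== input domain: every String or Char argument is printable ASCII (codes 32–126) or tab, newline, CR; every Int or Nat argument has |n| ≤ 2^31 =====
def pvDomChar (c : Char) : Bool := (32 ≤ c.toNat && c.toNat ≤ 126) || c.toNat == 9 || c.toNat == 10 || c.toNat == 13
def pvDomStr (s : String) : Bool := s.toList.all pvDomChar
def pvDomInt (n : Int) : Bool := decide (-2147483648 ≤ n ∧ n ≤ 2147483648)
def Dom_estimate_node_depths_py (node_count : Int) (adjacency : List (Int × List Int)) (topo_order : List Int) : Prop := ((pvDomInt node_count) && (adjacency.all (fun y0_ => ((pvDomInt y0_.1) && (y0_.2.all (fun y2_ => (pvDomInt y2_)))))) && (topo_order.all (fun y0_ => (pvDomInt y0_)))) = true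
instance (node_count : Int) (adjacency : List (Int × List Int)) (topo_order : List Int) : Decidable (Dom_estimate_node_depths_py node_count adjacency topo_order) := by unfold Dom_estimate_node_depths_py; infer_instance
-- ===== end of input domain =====

-- B removes A's reverse-adjacency table: each node's depth is one max over incoming
-- edges found by scanning adjacency directly — simpler decomposition, same return value.

-- ===== PORT A =====
def estimate_node_depths_py (node_count : Int) (adjacency : List (Int × List Int)) (topo_order : List Int) : List (Int × Int) :=
  -- reverse_adj = defaultdict(list); for src, dst_list in adjacency.items(): for dst in dst_list: reverse_adj[dst].append(src)
  let reverse_adj : PySem.Dict Int (List Int) :=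
    adjacency.foldl (fun d p => p.2.foldl (fun d dst => d.modify dst [] (· ++ [p.1])) d) PySem.Dict.empty
  -- depth_by_node = {idx: 0 for idx in range(node_count)}
  let init : PySem.Dict Int Int :=
    (PySem.List.pyRange 0 node_count 1).foldl (fun d i => d.insert i 0) PySem.Dict.empty
  let final : PySem.Dict Int Int :=
    topo_order.foldl (fun d node_idx =>
      let parents := reverse_adj.getD node_idx []
      if parents = [] then d.insert node_idx 0
      -- depth_by_node[parent]: KeyError when parent is absent; excluded by Pre_, ported as getD _ 0
      else d.insert node_idx (1 + (PySem.List.max? (parents.map (fun par => d.getD par 0)) (fun x => x)).getD 0)) init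
  final.items

-- ===== PORT B =====
def estimate_node_depths_py_alt (node_count : Int) (adjacency : List (Int × List Int)) (topo_order : List Int) : List (Int × Int) :=
  let init : PySem.Dict Int Int :=
    (PySem.List.pyRange 0 node_count 1).foldl (fun d i => d.insert i 0) PySem.Dict.empty
  let final : PySem.Dict Int Int :=
    topo_order.foldl (fun d node_idx =>
      -- max((depth[src] + 1 for src, dst_list in adjacency.items() for dst in dst_list if dst == node_idx), default=0)
      -- depth_by_node[src]: KeyError when src is absent; excluded by Pre_, ported as getD _ 0
      d.insert node_idx
        ((PySem.List.max?
            (adjacency.flatMap (fun p => (p.2.filter (fun dst => dst == node_idx)).map (fun _ => d.getD p.1 0 + 1)))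
            (fun x => x)).getD 0)) init
  final.items

-- ===== PRECONDITION & SPEC =====
-- Pre_ excludes exactly the inputs where Python A raises KeyError: some node of topo_order
-- has an incoming edge whose source is neither in range(node_count) nor assigned by an
-- earlier topo_order entry at the moment its depth is read.
def Pre_estimate_node_depths_py (node_count : Int) (adjacency : List (Int × List Int)) (topo_order : List Int) : Prop :=
  ∀ k, k < topo_order.length → ∀ p ∈ adjacency, topo_order[k]! ∈ p.2 →
    ((0 ≤ p.1 ∧ p.1 < node_count) ∨ p.1 ∈ topo_order.take k)
instance (node_count : Int) (adjacency : List (Int × List Int)) (topo_order : List Int) : Decidable (Pre_estimate_node_depths_py node_count adjacency topo_order) := by unfold Pre_estimate_node_depths_py; infer_instance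

def pvWitness_estimate_node_depths_py : Int × (List (Int × List Int)) × List Int := (2, [(0, [1])], [0, 1])

def Spec_estimate_node_depths_py (node_count : Int) (adjacency : List (Int × List Int)) (topo_order : List Int) (out : List (Int × Int)) : Prop := out = estimate_node_depths_py_alt node_count adjacency topo_order
instance (node_count : Int) (adjacency : List (Int × List Int)) (topo_order : List Int) (out : List (Int × Int)) : Decidable (Spec_estimate_node_depths_py node_count adjacency topo_order out) := by unfold Spec_estimate_node_depths_py; infer_instance

-- ===== CLAIM (what is proved, stated in full; the proofs are below) =====
def Claim_equal_estimate_node_depths_py : Prop := ∀ (node_count : Int) (adjacency : List (Int × List Int)) (topo_order : List Int), Dom_estimate_node_depths_py node_count adjacency topo_order → Pre_estimate_node_depths_py node_count adjacency topo_order → Spec_estimate_node_depths_py node_count adjacency topo_order (estimate_node_depths_py node_count adjacency topo_order)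

-- ===== LEMMAS AND PROOFS =====

-- inner append loop of A's reverse-adjacency build, characterised via getD
theorem pv_inner_rev (ds : List Int) (s v : Int) (d : PySem.Dict Int (List Int)) :
    (ds.foldl (fun d dst => d.modify dst [] (· ++ [s])) d).getD v []
      = d.getD v [] ++ List.replicate (ds.filter (fun dst => dst == v)).length s := by
  have h := PySem.Dict.getD_foldl_modify_append (l := ds.map (fun dst => (dst, s))) (d := d) (c := v)
  simpa [List.foldl_map, List.filter_map, Function.comp_def, List.map_map] using h

-- A's reverse_adj lookup equals the direct scan of adjacency
theorem pv_rev_getD (l : List (Int × List Int)) (v : Int) (d : PySem.Dict Int (List Int)) :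
    (l.foldl (fun d p => p.2.foldl (fun d dst => d.modify dst [] (· ++ [p.1])) d) d).getD v []
      = d.getD v [] ++ l.flatMap (fun p => (p.2.filter (fun dst => dst == v)).map (fun _ => p.1)) := by
  induction l generalizing d with
  | nil => simp
  | cons p t ih => simp [ih, pv_inner_rev, List.append_assoc]

-- 1 + running max  =  running max of the (+1)-shifted list
theorem pv_foldl_max_add (l : List Int) (x : Int) :
    (l.map (fun y => y + 1)).foldl max (x + 1) = l.foldl max x + 1 := by
  induction l generalizing x with
  | nil => simp
  | cons b t ih => simpa [max_add_add_right] using ih (max x b)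

-- foldl respects pointwise-equal step functions
theorem pv_foldl_ext {α β : Type} (f g : β → α → β) (h : ∀ b a, f b a = g b a) (l : List α) (b : β) :
    l.foldl f b = l.foldl g b := by
  induction l generalizing b with
  | nil => rfl
  | cons x t ih => rw [List.foldl_cons, List.foldl_cons, h, ih]

-- the two loop bodies agree on every state and node
theorem pv_step_eq (adjacency : List (Int × List Int)) (d : PySem.Dict Int Int) (v : Int) :
    (let parents := (adjacency.foldl (fun d p => p.2.foldl (fun d dst => d.modify dst [] (· ++ [p.1])) d) PySem.Dict.empty).getD v []
     if parents = [] then d.insert v 0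
     else d.insert v (1 + (PySem.List.max? (parents.map (fun par => d.getD par 0)) (fun x => x)).getD 0))
    = d.insert v
        ((PySem.List.max?
            (adjacency.flatMap (fun p => (p.2.filter (fun dst => dst == v)).map (fun _ => d.getD p.1 0 + 1)))
            (fun x => x)).getD 0) := by
  have hrev : (adjacency.foldl (fun d p => p.2.foldl (fun d dst => d.modify dst [] (· ++ [p.1])) d) PySem.Dict.empty).getD v []
      = adjacency.flatMap (fun p => (p.2.filter (fun dst => dst == v)).map (fun _ => p.1)) := by
    simpa using pv_rev_getD adjacency v PySem.Dict.empty
  have hvals : adjacency.flatMap (fun p => (p.2.filter (fun dst => dst == v)).map (fun _ => d.getD p.1 0 + 1))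
      = ((adjacency.flatMap (fun p => (p.2.filter (fun dst => dst == v)).map (fun _ => p.1))).map (fun par => d.getD par 0 + 1)) := by
    simp [List.map_flatMap]
  simp only [hrev, hvals]
  cases hp : adjacency.flatMap (fun p => (p.2.filter (fun dst => dst == v)).map (fun _ => p.1)) with
  | nil => simp [PySem.List.max?]
  | cons a t =>
      simp only [List.map_cons, PySem.List.max?_id_cons, Option.getD_some, if_neg (List.cons_ne_nil a t)]
      have h2 : List.foldl max (d.getD a 0 + 1) (List.map (fun par => d.getD par 0 + 1) t)
          = List.foldl max (d.getD a 0) (List.map (fun par => d.getD par 0) t) + 1 := by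
        simpa [List.map_map, Function.comp] using pv_foldl_max_add (t.map (fun par => d.getD par 0)) (d.getD a 0)
      rw [h2, Int.add_comm]

-- ===== VERDICT (by name: the statement is the Claim_ definition above) =====
theorem estimate_node_depths_py_spec : Claim_equal_estimate_node_depths_py := by
  intro node_count adjacency topo_order _ _
  unfold Spec_estimate_node_depths_py estimate_node_depths_py estimate_node_depths_py_alt
  exact congrArg PySem.Dict.items
    (pv_foldl_ext _ _ (fun d v => pv_step_eq adjacency d v) topo_order
      ((PySem.List.pyRange 0 node_count 1).foldl (fun d i => d.insert i 0) PySem.Dict.empty))
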